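-- pv_equiv track=rewrite | github.com/tipa16384/wordle | waffle.py | process_norm_word
-- ===== SOURCE A (Python) =====
-- def process_norm_word(word: list, guess: list) -> int:
--     "return the distance between the word and guess"
--     nresult = [2] * len(word)
--     # make a dict with key letter and value count for word
--     word_dict = {}
--     for letter in word:
--         if letter in word_dict:
--             word_dict[letter] += 1
--         else:
--             word_dict[letter] = 1
--
--     # put a 0 in nresult for each letter in word that matches the corresponding letter in guess
--     for i in range(len(word)):
--         if word[i] == guess[i]:
--             nresult[i] = 0
--             word_dict[guess[i]] -= 1
--
--     for i in range(len(word)):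
--         if nresult[i] == 0:
--             continue
--         if guess[i] in word_dict and word_dict[guess[i]] > 0:
--             nresult[i] = 1
--             word_dict[guess[i]] -= 1
--
--     return sum(nresult)
-- ===== SOURCE B (Python) =====
-- def process_norm_word(word: list, guess: list) -> int:
--     "return the distance between the word and guess"
--     n = len(word)
--     greens = 0
--     for i in range(n):
--         if word[i] == guess[i]:
--             greens += 1
--     word_counts = {}
--     for letter in word:
--         word_counts[letter] = word_counts.get(letter, 0) + 1
--     guess_counts = {}
--     for letter in guess[:n]:
--         guess_counts[letter] = guess_counts.get(letter, 0) + 1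
--     total_min = 0
--     for letter, c in word_counts.items():
--         total_min += min(c, guess_counts.get(letter, 0))
--     return 2 * n - greens - total_min
-- ===== Notes on version B (the rewrite author's own statement) =====
-- stated objective: alternative
-- what changed: Replaces A's two per-position greedy passes that mutate a result list and decrement a letter dict by closed counts: greens from one indexed scan plus per-letter min of word/guess letter counters, returning 2*len(word) - greens - total_min (identity yellows = total_min - greens).
import Mathlib
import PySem

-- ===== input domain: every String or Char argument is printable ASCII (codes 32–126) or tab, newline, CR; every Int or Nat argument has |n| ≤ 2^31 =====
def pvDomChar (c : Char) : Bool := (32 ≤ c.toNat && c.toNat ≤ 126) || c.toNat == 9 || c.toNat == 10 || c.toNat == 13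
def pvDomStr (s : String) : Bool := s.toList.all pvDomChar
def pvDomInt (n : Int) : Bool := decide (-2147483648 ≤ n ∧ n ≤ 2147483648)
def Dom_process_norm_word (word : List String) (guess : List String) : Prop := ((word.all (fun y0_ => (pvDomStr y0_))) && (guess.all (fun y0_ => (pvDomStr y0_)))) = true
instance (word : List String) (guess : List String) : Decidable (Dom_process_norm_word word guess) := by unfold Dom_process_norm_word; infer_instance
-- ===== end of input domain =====

-- B replaces A's two per-position greedy decrement passes by closed counts:
-- greens + per-letter min of word/guess letter counts (yellows = total_min - greens);
-- proved equal to A on all inputs where A returns (guess at least as long as word).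


-- ===== PORT A =====
-- literal transliteration of Source A; the pyGetD defaults are never used under
-- Pre_ (every index is in range there), and `word_dict[guess[i]] -= 1` is ported as
-- insert (getD - 1): the key is present whenever Python reaches that line.
def process_norm_word (word : List String) (guess : List String) : Int :=
  let n : Int := word.length
  let nresult : List Int := PySem.List.pyRepeat [2] n
  let word_dict : PySem.Dict String Int :=
    word.foldl (fun d letter =>
      if d.contains letter then d.insert letter (d.getD letter 0 + 1)
      else d.insert letter 1) PySem.Dict.empty
  let st1 : List Int × PySem.Dict String Int :=
    (PySem.List.pyRange 0 n 1).foldl (fun st i =>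
      if PySem.List.pyGetD word i "" == PySem.List.pyGetD guess i "" then
        (PySem.List.pySetD st.1 i 0,
         st.2.insert (PySem.List.pyGetD guess i "")
           (st.2.getD (PySem.List.pyGetD guess i "") 0 - 1))
      else st) (nresult, word_dict)
  let st2 : List Int × PySem.Dict String Int :=
    (PySem.List.pyRange 0 n 1).foldl (fun st i =>
      if PySem.List.pyGetD st.1 i 0 == 0 then st
      else if st.2.contains (PySem.List.pyGetD guess i "") &&
              decide (0 < st.2.getD (PySem.List.pyGetD guess i "") 0) then
        (PySem.List.pySetD st.1 i 1,
         st.2.insert (PySem.List.pyGetD guess i "")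
           (st.2.getD (PySem.List.pyGetD guess i "") 0 - 1))
      else st) st1
  st2.1.sum

-- ===== PORT B =====
-- transliteration of Source B
def process_norm_word_alt (word : List String) (guess : List String) : Int :=
  let n : Int := word.length
  let greens : Int :=
    (PySem.List.pyRange 0 n 1).foldl (fun acc i =>
      if PySem.List.pyGetD word i "" == PySem.List.pyGetD guess i "" then acc + 1
      else acc) 0
  let word_counts : PySem.Dict String Int :=
    word.foldl (fun d letter => d.insert letter (d.getD letter 0 + 1)) PySem.Dict.empty
  let guess_counts : PySem.Dict String Int :=
    (PySem.List.slice guess none (some n)).foldl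
      (fun d letter => d.insert letter (d.getD letter 0 + 1)) PySem.Dict.empty
  let total_min : Int :=
    word_counts.items.foldl (fun acc p => acc + min p.2 (guess_counts.getD p.1 0)) 0
  2 * n - greens - total_min

-- ===== PRECONDITION & SPEC =====
-- Pre_ excludes exactly the inputs where A raises IndexError (guess shorter than word);
-- B's indexed green loop raises there too.
def Pre_process_norm_word (word : List String) (guess : List String) : Prop :=
  word.length ≤ guess.length
instance (word : List String) (guess : List String) : Decidable (Pre_process_norm_word word guess) := by unfold Pre_process_norm_word; infer_instance
def pvWitness_process_norm_word : List String × List String :=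
  (["a", "b", "b", "c"], ["b", "b", "a", "a", "d"])

def Spec_process_norm_word (word : List String) (guess : List String) (out : Int) : Prop := out = process_norm_word_alt word guess
instance (word : List String) (guess : List String) (out : Int) : Decidable (Spec_process_norm_word word guess out) := by unfold Spec_process_norm_word; infer_instance

-- ===== CLAIM (what is proved, stated in full; the proofs are below) =====
def Claim_equal_process_norm_word : Prop := ∀ (word : List String) (guess : List String), Dom_process_norm_word word guess → Pre_process_norm_word word guess → Spec_process_norm_word word guess (process_norm_word word guess)


-- ===== LEMMAS AND PROOFS =====

-- the aligned (word-letter, guess-letter) pairs: guess truncated to word's length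
def pvPairs (word : List String) (guess : List String) : List (String × String) :=
  word.zip (guess.take word.length)

-- value contributed to sum(nresult) by A's third pass, position by position
def pvValSum : List (String × String) → PySem.Dict String Int → Int
  | [], _ => 0
  | (w, g) :: rest, d =>
    if w = g then pvValSum rest d
    else if 0 < d.getD g 0 then 1 + pvValSum rest (d.insert g (d.getD g 0 - 1))
    else 2 + pvValSum rest d

lemma pv_take_set (l : List Int) (i : Nat) (v : Int) : (l.set i v).take i = l.take i := by
  apply List.ext_getElem (by simp) ?_
  intro j h1 h2
  simp only [List.getElem_take]
  rw [List.getElem_set_ne]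
  simp at h1; omega

lemma pv_count_pair_le_fst (ps : List (String × String)) (a b : String) :
    ps.count (a, b) ≤ (ps.map Prod.fst).count a := by
  induction ps with
  | nil => simp
  | cons p t ih =>
    rcases p with ⟨x, y⟩
    simp only [List.map_cons, List.count_cons]
    split_ifs with h1 h2 h2 <;> simp_all
    all_goals omega

lemma pv_count_pair_le_snd (ps : List (String × String)) (a b : String) :
    ps.count (a, b) ≤ (ps.map Prod.snd).count b := by
  induction ps with
  | nil => simp
  | cons p t ih =>
    rcases p with ⟨x, y⟩
    simp only [List.map_cons, List.count_cons]
    split_ifs with h1 h2 h2 <;> simp_all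
    all_goals omega

lemma pv_sum_single_diff (L : List String) (hL : L.Nodup) (x : String) (hx : x ∈ L)
    (f g : String → Int) (δ : Int) (hfg : ∀ l ∈ L, l ≠ x → f l = g l) (hfx : f x = g x + δ) :
    (L.map f).sum = (L.map g).sum + δ := by
  induction L with
  | nil => cases hx
  | cons y t ih =>
    simp only [List.map_cons, List.sum_cons]
    rcases List.mem_cons.mp hx with rfl | hxt
    · have ht : ∀ l ∈ t, f l = g l := fun l hl =>
        hfg l (List.mem_cons_of_mem _ hl) (fun h => (List.nodup_cons.mp hL).1 (h ▸ hl))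
      rw [List.map_congr_left ht, hfx]; ring
    · have hyx : y ≠ x := fun h => (List.nodup_cons.mp hL).1 (h ▸ hxt)
      rw [ih (List.nodup_cons.mp hL).2 hxt
        (fun l hl hlx => hfg l (List.mem_cons_of_mem _ hl) hlx),
        hfg y List.mem_cons_self hyx]
      ring

-- non-green guess occurrences of a letter = all its occurrences minus green ones
lemma pv_count_nongreen (ps : List (String × String)) (l : String) :
    ((ps.filter (fun p => decide (p.1 ≠ p.2))).map Prod.snd).count l + ps.count (l, l)
      = (ps.map Prod.snd).count l := by
  induction ps with
  | nil => simp
  | cons p t ih =>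
    rcases p with ⟨x, y⟩
    by_cases hxy : x = y <;> by_cases hyl : y = l <;>
      simp_all [Prod.ext_iff] <;> omega

-- the number of green pairs, counted letter by letter over any distinct cover
lemma pv_countP_green (ps : List (String × String)) (L : List String) (hL : L.Nodup)
    (hcov : ∀ p ∈ ps, p.1 = p.2 → p.1 ∈ L) :
    (ps.countP (fun p => p.1 == p.2) : Int) = (L.map (fun l => (ps.count (l, l) : Int))).sum := by
  induction ps with
  | nil =>
    simp only [List.countP_nil, Nat.cast_zero, List.count_nil]
    exact (List.sum_eq_zero (by simp)).symm
  | cons p t ih =>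
    rcases p with ⟨x, y⟩
    by_cases hxy : x = y
    · subst hxy
      have hxL : x ∈ L := hcov (x, x) List.mem_cons_self rfl
      rw [List.countP_cons_of_pos (by simp)]
      push_cast
      rw [ih (fun p hp hg => hcov p (List.mem_cons_of_mem _ hp) hg)]
      refine (pv_sum_single_diff L hL x hxL _ _ 1 ?_ ?_).symm
      · intro l _ hlx
        rw [List.count_cons_of_ne (by simp only [ne_eq, Prod.mk.injEq, not_and]; intro h1 _; exact hlx h1.symm)]
      · rw [List.count_cons_self]; push_cast; ring
    · rw [List.countP_cons_of_neg (by simp [hxy])]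
      rw [ih (fun p hp hg => hcov p (List.mem_cons_of_mem _ hp) hg)]
      refine congrArg List.sum (List.map_congr_left ?_)
      intro l _
      rw [List.count_cons_of_ne (by simp only [ne_eq, Prod.mk.injEq, not_and]; intro h1 h2; exact hxy (h1.trans h2.symm))]

-- greens and non-greens partition the positions
lemma pv_countP_split (ps : List (String × String)) :
    ps.countP (fun p => decide (p.1 ≠ p.2)) + ps.countP (fun p => p.1 == p.2) = ps.length := by
  induction ps with
  | nil => rfl
  | cons p t ih =>
    by_cases h : p.1 = p.2
    · rw [List.countP_cons_of_neg (by simp [h]), List.countP_cons_of_pos (by simp [h])]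
      simp only [List.length_cons]
      omega
    · rw [List.countP_cons_of_pos (by simp [h]), List.countP_cons_of_neg (by simp [h])]
      simp only [List.length_cons]
      omega

-- A's third pass, characterised against any dict via pvValSum
lemma pv_valSum_eq (ps : List (String × String)) (d : PySem.Dict String Int)
    (L : List String) (hL : L.Nodup) (hcov : ∀ p ∈ ps, p.1 ≠ p.2 → p.2 ∈ L) :
    pvValSum ps d = 2 * (ps.countP (fun p => decide (p.1 ≠ p.2)) : Int)
      - (L.map (fun l => min (max (d.getD l 0) 0)
          (((ps.filter (fun p => decide (p.1 ≠ p.2))).map Prod.snd).count l : Int))).sum := by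
  induction ps generalizing d with
  | nil =>
    have hz : (L.map fun l => min (max (d.getD l 0) 0) ((0 : Nat) : Int)).sum = 0 :=
      List.sum_eq_zero (by
        intro x hx
        obtain ⟨l, _, rfl⟩ := List.mem_map.mp hx
        omega)
    simp only [pvValSum, List.countP_nil, Nat.cast_zero, List.filter_nil, List.map_nil,
      List.count_nil, mul_zero, zero_sub] at hz ⊢
    rw [hz]; ring
  | cons p t ih =>
    rcases p with ⟨w, g⟩
    have hcov' : ∀ p ∈ t, p.1 ≠ p.2 → p.2 ∈ L :=
      fun p hp hne => hcov p (List.mem_cons_of_mem _ hp) hne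
    by_cases hwg : w = g
    · subst hwg
      have hstep : pvValSum ((w, w) :: t) d = pvValSum t d := by simp [pvValSum]
      rw [hstep, ih d hcov', List.countP_cons_of_neg (by simp),
        List.filter_cons_of_neg (by simp)]
    · have hg : g ∈ L := hcov (w, g) List.mem_cons_self hwg
      have hstep : pvValSum ((w, g) :: t) d
          = if 0 < d.getD g 0 then 1 + pvValSum t (d.insert g (d.getD g 0 - 1))
            else 2 + pvValSum t d := by simp [pvValSum, hwg]
      rw [hstep, List.countP_cons_of_pos (by simp [hwg]), List.filter_cons_of_pos (by simp [hwg])]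
      simp only [List.map_cons]
      by_cases hc : 0 < d.getD g 0
      · rw [if_pos hc, ih _ hcov']
        have hS : (L.map fun l => min (max (d.getD l 0) 0)
              ((List.count l (g :: (t.filter (fun p => decide (p.1 ≠ p.2))).map Prod.snd)) : Int)).sum
            = (L.map fun l => min (max ((d.insert g (d.getD g 0 - 1)).getD l 0) 0)
              ((List.count l ((t.filter (fun p => decide (p.1 ≠ p.2))).map Prod.snd)) : Int)).sum + 1 := by
          refine pv_sum_single_diff L hL g hg _ _ 1 ?_ ?_
          · intro l _ hlg
            rw [List.count_cons_of_ne (Ne.symm hlg), PySem.Dict.getD_insert]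
            simp [hlg]
          · rw [List.count_cons_self, PySem.Dict.getD_insert, if_pos rfl]
            push_cast
            omega
        rw [hS]
        push_cast
        ring
      · rw [if_neg hc, ih d hcov']
        have hS : (L.map fun l => min (max (d.getD l 0) 0)
              ((List.count l (g :: (t.filter (fun p => decide (p.1 ≠ p.2))).map Prod.snd)) : Int)).sum
            = (L.map fun l => min (max (d.getD l 0) 0)
              ((List.count l ((t.filter (fun p => decide (p.1 ≠ p.2))).map Prod.snd)) : Int)).sum := by
          refine congrArg List.sum (List.map_congr_left ?_)
          intro l _
          by_cases hlg : l = g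
          · subst hlg
            rw [List.count_cons_self]
            push_cast
            omega
          · rw [List.count_cons_of_ne (Ne.symm hlg)]
        rw [hS]
        push_cast
        ring

-- B's green-counting loop
lemma pv_pairs_length (word guess : List String) (hpre : word.length ≤ guess.length) :
    (pvPairs word guess).length = word.length := by
  simp [pvPairs]
  omega

lemma pv_pairs_drop (word guess : List String) (hpre : word.length ≤ guess.length)
    (a : Nat) (ha : a < word.length) :
    (pvPairs word guess).drop a
      = (word[a]'ha, guess[a]'(by omega)) :: (pvPairs word guess).drop (a + 1) := by
  rw [List.drop_eq_getElem_cons (by rw [pv_pairs_length word guess hpre]; exact ha)]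
  congr 1
  have h1 : (pvPairs word guess)[a]'(by rw [pv_pairs_length word guess hpre]; exact ha)
      = (word[a]'ha, (guess.take word.length)[a]'(by simp; omega)) := List.getElem_zip
  rw [h1, List.getElem_take]

lemma pv_greens (word guess : List String) (hpre : word.length ≤ guess.length) :
    ∀ (k a : Nat), a + k = word.length → ∀ (acc : Int),
    (PySem.List.pyRange (a : Int) ((word.length : Nat) : Int) 1).foldl (fun acc i =>
        if PySem.List.pyGetD word i "" == PySem.List.pyGetD guess i "" then acc + 1
        else acc) acc
      = acc + (((pvPairs word guess).drop a).countP (fun p => p.1 == p.2) : Int) := by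
  intro k
  induction k with
  | zero =>
    intro a ha acc
    rw [PySem.List.pyRange_one_eq_nil (by exact_mod_cast Nat.le_of_eq (by omega))]
    rw [List.drop_of_length_le (by rw [pv_pairs_length word guess hpre]; omega)]
    simp
  | succ k ih =>
    intro a ha acc
    have han : a < word.length := by omega
    rw [PySem.List.pyRange_one_cons (by exact_mod_cast han)]
    simp only [List.foldl_cons]
    have hcast : ((a : Int) + 1) = (((a + 1 : Nat)) : Int) := by push_cast; ring
    rw [hcast, pv_pairs_drop word guess hpre a han]
    have hw : PySem.List.pyGetD word ((a : Nat) : Int) "" = word[a]'han := by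
      rw [PySem.List.pyGetD_natCast, List.getD_eq_getElem _ _ han]
    have hg : PySem.List.pyGetD guess ((a : Nat) : Int) "" = guess[a]'(by omega) := by
      rw [PySem.List.pyGetD_natCast, List.getD_eq_getElem _ _ (by omega)]
    rw [hw, hg]
    by_cases heq : word[a]'han = guess[a]'(by omega)
    · rw [if_pos (by simp [heq]), ih (a + 1) (by omega)]
      rw [List.countP_cons_of_pos (by simp [heq])]
      push_cast
      ring
    · rw [if_neg (by simp [heq]), ih (a + 1) (by omega)]
      rw [List.countP_cons_of_neg (by simp [heq])]

-- A's second (green) pass: result list pattern and per-letter dict decrements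
lemma pv_pass2 (word guess : List String) (hpre : word.length ≤ guess.length) :
    ∀ (k a : Nat), a + k = word.length →
    ∀ (r : List Int) (d : PySem.Dict String Int), r.length = word.length →
    (((PySem.List.pyRange (a : Int) ((word.length : Nat) : Int) 1).foldl (fun st i =>
        if PySem.List.pyGetD word i "" == PySem.List.pyGetD guess i "" then
          (PySem.List.pySetD st.1 i 0,
           st.2.insert (PySem.List.pyGetD guess i "")
             (st.2.getD (PySem.List.pyGetD guess i "") 0 - 1))
        else st) (r, d)).1.length = word.length
     ∧ (∀ j : Nat, j < word.length →
         ((PySem.List.pyRange (a : Int) ((word.length : Nat) : Int) 1).foldl (fun st i =>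
            if PySem.List.pyGetD word i "" == PySem.List.pyGetD guess i "" then
              (PySem.List.pySetD st.1 i 0,
               st.2.insert (PySem.List.pyGetD guess i "")
                 (st.2.getD (PySem.List.pyGetD guess i "") 0 - 1))
            else st) (r, d)).1.getD j 0
           = if a ≤ j ∧ word.getD j "" = guess.getD j "" then 0 else r.getD j 0)
     ∧ (∀ l : String,
         ((PySem.List.pyRange (a : Int) ((word.length : Nat) : Int) 1).foldl (fun st i =>
            if PySem.List.pyGetD word i "" == PySem.List.pyGetD guess i "" then
              (PySem.List.pySetD st.1 i 0,
               st.2.insert (PySem.List.pyGetD guess i "")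
                 (st.2.getD (PySem.List.pyGetD guess i "") 0 - 1))
            else st) (r, d)).2.getD l 0
           = d.getD l 0 - (((pvPairs word guess).drop a).count (l, l) : Int))) := by
  intro k
  induction k with
  | zero =>
    intro a ha r d hr
    rw [PySem.List.pyRange_one_eq_nil (by exact_mod_cast Nat.le_of_eq (by omega))]
    simp only [List.foldl_nil]
    refine ⟨hr, ?_, ?_⟩
    · intro j hj
      rw [if_neg (by intro h; omega)]
    · intro l
      rw [List.drop_of_length_le (by rw [pv_pairs_length word guess hpre]; omega)]
      simp
  | succ k ih =>
    intro a ha r d hr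
    have han : a < word.length := by omega
    have hag : a < guess.length := by omega
    rw [PySem.List.pyRange_one_cons (by exact_mod_cast han)]
    simp only [List.foldl_cons]
    have hcast : ((a : Int) + 1) = (((a + 1 : Nat)) : Int) := by push_cast; ring
    rw [hcast]
    have hw : PySem.List.pyGetD word ((a : Nat) : Int) "" = word[a]'han := by
      rw [PySem.List.pyGetD_natCast, List.getD_eq_getElem _ _ han]
    have hgg : PySem.List.pyGetD guess ((a : Nat) : Int) "" = guess[a]'hag := by
      rw [PySem.List.pyGetD_natCast, List.getD_eq_getElem _ _ hag]
    have hwD : word.getD a "" = word[a]'han := List.getD_eq_getElem _ _ han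
    have hgD : guess.getD a "" = guess[a]'hag := List.getD_eq_getElem _ _ hag
    by_cases heq : word[a]'han = guess[a]'hag
    · rw [if_pos (by rw [hw, hgg]; simp [heq])]
      rw [hgg, PySem.List.pySetD_natCast]
      obtain ⟨L1, L2, L3⟩ := ih (a + 1) (by omega) (r.set a 0)
        (d.insert (guess[a]'hag) (d.getD (guess[a]'hag) 0 - 1)) (by simp [hr])
      refine ⟨L1, ?_, ?_⟩
      · intro j hj
        rw [L2 j hj]
        by_cases hj1 : a + 1 ≤ j ∧ word.getD j "" = guess.getD j ""
        · rw [if_pos hj1, if_pos ⟨by omega, hj1.2⟩]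
        · rw [if_neg hj1]
          by_cases hj2 : a ≤ j ∧ word.getD j "" = guess.getD j ""
          · have hna : ¬ (a + 1 ≤ j) := fun h => hj1 ⟨h, hj2.2⟩
            have hja : j = a := by omega
            subst hja
            rw [if_pos hj2, List.getD_eq_getElem _ _ (by rw [List.length_set]; omega)]
            simp
          · rw [if_neg hj2]
            have hja : j ≠ a := by
              intro h
              subst h
              exact hj2 ⟨le_refl _, by rw [hwD, hgD]; exact heq⟩
            rw [List.getD_eq_getElem?_getD, List.getElem?_set_ne (by omega),
              ← List.getD_eq_getElem?_getD]
      · intro l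
        rw [L3 l, pv_pairs_drop word guess hpre a han, List.count_cons,
          PySem.Dict.getD_insert]
        by_cases hl : l = guess[a]'hag
        · subst hl
          rw [if_pos rfl]
          have hb : ((word[a]'han, guess[a]'hag) == (guess[a]'hag, guess[a]'hag)) = true := by
            simp [heq]
          simp only [hb, if_true]
          push_cast
          omega
        · rw [if_neg hl]
          have hb : ((word[a]'han, guess[a]'hag) == (l, l)) = false := by
            simp only [beq_eq_false_iff_ne, ne_eq, Prod.ext_iff, not_and]
            intro _ h2
            exact absurd h2.symm hl
          simp only [hb, Bool.false_eq_true, if_false]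
          push_cast
          omega
    · rw [if_neg (by rw [hw, hgg]; simp [heq])]
      obtain ⟨L1, L2, L3⟩ := ih (a + 1) (by omega) r d hr
      refine ⟨L1, ?_, ?_⟩
      · intro j hj
        rw [L2 j hj]
        by_cases hj1 : a + 1 ≤ j ∧ word.getD j "" = guess.getD j ""
        · rw [if_pos hj1, if_pos ⟨by omega, hj1.2⟩]
        · rw [if_neg hj1]
          by_cases hj2 : a ≤ j ∧ word.getD j "" = guess.getD j ""
          · have hna : ¬ (a + 1 ≤ j) := fun h => hj1 ⟨h, hj2.2⟩
            have hja : j = a := by omega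
            subst hja
            exact absurd (by rw [hwD, hgD] at hj2; exact hj2.2) heq
          · rw [if_neg hj2]
      · intro l
        rw [L3 l, pv_pairs_drop word guess hpre a han, List.count_cons]
        have hb : ((word[a]'han, guess[a]'hag) == (l, l)) = false := by
          simp only [beq_eq_false_iff_ne, ne_eq, Prod.ext_iff, not_and]
          intro h1 h2
          exact absurd (h1.trans h2.symm) heq
        simp only [hb, Bool.false_eq_true, if_false]
        push_cast
        omega

-- A's third pass totals pvValSum over the remaining positions
lemma pv_pass3 (word guess : List String) (hpre : word.length ≤ guess.length) :
    ∀ (k a : Nat), a + k = word.length →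
    ∀ (r : List Int) (d : PySem.Dict String Int), r.length = word.length →
    (∀ j : Nat, a ≤ j → j < word.length →
        r.getD j 0 = if word.getD j "" = guess.getD j "" then 0 else 2) →
    ((PySem.List.pyRange (a : Int) ((word.length : Nat) : Int) 1).foldl (fun st i =>
        if PySem.List.pyGetD st.1 i 0 == 0 then st
        else if st.2.contains (PySem.List.pyGetD guess i "") &&
                decide (0 < st.2.getD (PySem.List.pyGetD guess i "") 0) then
          (PySem.List.pySetD st.1 i 1,
           st.2.insert (PySem.List.pyGetD guess i "")
             (st.2.getD (PySem.List.pyGetD guess i "") 0 - 1))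
        else st) (r, d)).1.sum
      = (r.take a).sum + pvValSum ((pvPairs word guess).drop a) d := by
  intro k
  induction k with
  | zero =>
    intro a ha r d hr hpat
    rw [PySem.List.pyRange_one_eq_nil (by exact_mod_cast Nat.le_of_eq (by omega))]
    simp only [List.foldl_nil]
    rw [List.drop_of_length_le (by rw [pv_pairs_length word guess hpre]; omega),
      List.take_of_length_le (by omega)]
    simp [pvValSum]
  | succ k ih =>
    intro a ha r d hr hpat
    have han : a < word.length := by omega
    have hag : a < guess.length := by omega
    rw [PySem.List.pyRange_one_cons (by exact_mod_cast han)]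
    simp only [List.foldl_cons]
    have hcast : ((a : Int) + 1) = (((a + 1 : Nat)) : Int) := by push_cast; ring
    rw [hcast]
    have hgg : PySem.List.pyGetD guess ((a : Nat) : Int) "" = guess[a]'hag := by
      rw [PySem.List.pyGetD_natCast, List.getD_eq_getElem _ _ hag]
    have hwD : word.getD a "" = word[a]'han := List.getD_eq_getElem _ _ han
    have hgD : guess.getD a "" = guess[a]'hag := List.getD_eq_getElem _ _ hag
    have hrlt : a < r.length := by omega
    have hrv := hpat a (le_refl a) han
    rw [pv_pairs_drop word guess hpre a han]
    by_cases heq : word[a]'han = guess[a]'hag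
    · have h0 : r.getD a 0 = 0 := by rw [hrv, if_pos (by rw [hwD, hgD]; exact heq)]
      rw [if_pos (by rw [PySem.List.pyGetD_natCast, h0]; decide)]
      rw [ih (a + 1) (by omega) r d hr (fun j hj1 hj2 => hpat j (by omega) hj2)]
      have hv : pvValSum ((word[a]'han, guess[a]'hag) :: (pvPairs word guess).drop (a + 1)) d
          = pvValSum ((pvPairs word guess).drop (a + 1)) d := by simp [pvValSum, heq]
      have hgetr : r[a]'hrlt = 0 := by
        have := h0
        rwa [List.getD_eq_getElem _ _ hrlt] at this
      rw [hv, List.sum_take_succ _ a hrlt, hgetr]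
      ring
    · have h2 : r.getD a 0 = 2 := by rw [hrv, if_neg (by rw [hwD, hgD]; exact heq)]
      rw [if_neg (by rw [PySem.List.pyGetD_natCast, h2]; decide)]
      rw [hgg]
      have hcond : (d.contains (guess[a]'hag) && decide (0 < d.getD (guess[a]'hag) 0))
          = decide (0 < d.getD (guess[a]'hag) 0) := by
        by_cases hc : 0 < d.getD (guess[a]'hag) 0
        · have hct : d.contains (guess[a]'hag) = true := by
            by_contra h
            rw [PySem.Dict.getD_of_not_contains d 0 (by simpa using h)] at hc
            omega
          simp [hct, hc]
        · simp [hc]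
      rw [hcond]
      by_cases hc : 0 < d.getD (guess[a]'hag) 0
      · rw [if_pos (by simpa using hc), PySem.List.pySetD_natCast]
        rw [ih (a + 1) (by omega) (r.set a 1)
          (d.insert (guess[a]'hag) (d.getD (guess[a]'hag) 0 - 1)) (by simp [hr])
          (fun j hj1 hj2 => by
            rw [List.getD_eq_getElem?_getD, List.getElem?_set_ne (by omega),
              ← List.getD_eq_getElem?_getD]
            exact hpat j (by omega) hj2)]
        have hv : pvValSum ((word[a]'han, guess[a]'hag) :: (pvPairs word guess).drop (a + 1)) d
            = 1 + pvValSum ((pvPairs word guess).drop (a + 1))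
                (d.insert (guess[a]'hag) (d.getD (guess[a]'hag) 0 - 1)) := by
          simp [pvValSum, heq, hc]
        rw [hv, List.sum_take_succ _ a (by rw [List.length_set]; exact hrlt), pv_take_set]
        have hset : (r.set a 1)[a]'(by rw [List.length_set]; exact hrlt) = 1 := by
          simp
        rw [hset]
        ring
      · rw [if_neg (by simpa using hc)]
        rw [ih (a + 1) (by omega) r d hr (fun j hj1 hj2 => hpat j (by omega) hj2)]
        have hv : pvValSum ((word[a]'han, guess[a]'hag) :: (pvPairs word guess).drop (a + 1)) d
            = 2 + pvValSum ((pvPairs word guess).drop (a + 1)) d := by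
          simp [pvValSum, heq, hc]
        have hgetr : r[a]'hrlt = 2 := by
          have := h2
          rwa [List.getD_eq_getElem _ _ hrlt] at this
        rw [hv, List.sum_take_succ _ a hrlt, hgetr]
        ring

lemma pv_pass3_pair (word guess : List String) (hpre : word.length ≤ guess.length)
    (st : List Int × PySem.Dict String Int) (hr : st.1.length = word.length)
    (hpat : ∀ j : Nat, 0 ≤ j → j < word.length →
        st.1.getD j 0 = if word.getD j "" = guess.getD j "" then 0 else 2) :
    ((PySem.List.pyRange (0 : Int) ((word.length : Nat) : Int) 1).foldl (fun st i =>
        if PySem.List.pyGetD st.1 i 0 == 0 then st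
        else if st.2.contains (PySem.List.pyGetD guess i "") &&
                decide (0 < st.2.getD (PySem.List.pyGetD guess i "") 0) then
          (PySem.List.pySetD st.1 i 1,
           st.2.insert (PySem.List.pyGetD guess i "")
             (st.2.getD (PySem.List.pyGetD guess i "") 0 - 1))
        else st) st).1.sum
      = pvValSum (pvPairs word guess) st.2 := by
  have h := pv_pass3 word guess hpre word.length 0 (by omega) st.1 st.2 hr
    (fun j hj1 hj2 => hpat j hj1 hj2)
  rw [Prod.mk.eta] at h
  simp only [Nat.cast_zero, List.drop_zero, List.take_zero, List.sum_nil, zero_add] at h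
  exact h

-- ===== VERDICT (by name: the statement is the Claim_ definition above) =====
theorem process_norm_word_spec : Claim_equal_process_norm_word := by
  intro word guess hdom hpre
  have hpre' : word.length ≤ guess.length := hpre
  unfold Spec_process_norm_word
  simp only [process_norm_word, process_norm_word_alt]
  -- the two counting loops build the same dict
  have hdict :
      word.foldl (fun d letter =>
        if d.contains letter then d.insert letter (d.getD letter 0 + 1)
        else d.insert letter 1) (PySem.Dict.empty : PySem.Dict String Int)
      = word.foldl (fun d letter => d.insert letter (d.getD letter 0 + 1))
          (PySem.Dict.empty : PySem.Dict String Int) := by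
    apply PySem.List.foldl_congr_mem
    intro d l _
    by_cases h : d.contains l = true
    · rw [if_pos h]
    · rw [if_neg h, PySem.Dict.getD_of_not_contains d 0 (by simpa using h)]
      norm_num
  rw [hdict, PySem.List.pyRepeat_singleton]
  simp only [Int.toNat_natCast]
  set W := word.foldl (fun d letter => d.insert letter (d.getD letter 0 + 1))
    (PySem.Dict.empty : PySem.Dict String Int) with hWdef
  have hW : ∀ l, W.getD l 0 = (word.count l : Int) := fun l => by
    rw [hWdef, PySem.Dict.getD_foldl_insert_add_one, PySem.Dict.getD_empty, zero_add]
  have hWkeys : W.keys = PySem.Set.ofList word := by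
    rw [hWdef, PySem.Dict.keys_foldl_insert]
    rfl
  have hWnodup : W.keys.Nodup := by
    rw [hWkeys]
    exact PySem.Set.nodup_ofList word
  -- A's green pass
  obtain ⟨P1, P2, P3⟩ := pv_pass2 word guess hpre' word.length 0 (by omega)
    (List.replicate word.length 2) W (by simp)
  simp only [Nat.cast_zero, List.drop_zero] at P1 P2 P3
  -- A's yellow pass
  rw [pv_pass3_pair word guess hpre' _ P1 (fun j hj0 hj => by
    rw [P2 j hj]
    simp [hj])]
  -- facts about the pair list
  have hfst : (pvPairs word guess).map Prod.fst = word := by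
    unfold pvPairs
    exact List.map_fst_zip (by simp; omega)
  have hsnd : (pvPairs word guess).map Prod.snd = guess.take word.length := by
    unfold pvPairs
    exact List.map_snd_zip (by simp)
  have hmw : ∀ l, (pvPairs word guess).count (l, l) ≤ word.count l := fun l => by
    have h := pv_count_pair_le_fst (pvPairs word guess) l l
    rwa [hfst] at h
  have hmg : ∀ l, (pvPairs word guess).count (l, l) ≤ (guess.take word.length).count l :=
    fun l => by
    have h := pv_count_pair_le_snd (pvPairs word guess) l l
    rwa [hsnd] at h
  have hys : ∀ l, (((pvPairs word guess).filter (fun p => decide (p.1 ≠ p.2))).map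
        Prod.snd).count l + (pvPairs word guess).count (l, l)
      = (guess.take word.length).count l := fun l => by
    have h := pv_count_nongreen (pvPairs word guess) l
    rwa [hsnd] at h
  -- rewrite A's total via the per-letter characterisation
  set L := PySem.Set.ofList (word ++
    ((pvPairs word guess).filter (fun p => decide (p.1 ≠ p.2))).map Prod.snd) with hLdef
  have hcovL : ∀ p ∈ pvPairs word guess, p.1 ≠ p.2 → p.2 ∈ L := by
    intro p hp hne
    rw [hLdef, PySem.Set.mem_ofList]
    exact List.mem_append_right _
      (List.mem_map_of_mem (List.mem_filter_of_mem hp (by simpa using hne)))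
  rw [pv_valSum_eq (pvPairs word guess) _ L (by rw [hLdef]; exact PySem.Set.nodup_ofList _) hcovL]
  simp only [P3, hW]
  have hterm : ∀ l ∈ L,
      min (max ((word.count l : Int) - ((pvPairs word guess).count (l, l) : Int)) 0)
        ((((pvPairs word guess).filter (fun p => decide (p.1 ≠ p.2))).map Prod.snd).count l : Int)
      = min ((word.count l : Int) - ((pvPairs word guess).count (l, l) : Int))
          (((guess.take word.length).count l : Int) - ((pvPairs word guess).count (l, l) : Int)) := by
    intro l _
    have h1 := hmw l
    have h2 := hmg l
    have h3 := hys l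
    omega
  rw [List.map_congr_left hterm]
  -- B side: greens loop
  have h5 := pv_greens word guess hpre' word.length 0 (by omega) 0
  simp only [Nat.cast_zero, List.drop_zero, zero_add] at h5
  rw [h5]
  -- B side: guess counter over the truncated guess
  rw [PySem.List.slice_to_natCast]
  have hGC : ∀ l, ((guess.take word.length).foldl
        (fun d letter => d.insert letter (d.getD letter 0 + 1)) PySem.Dict.empty).getD l 0
      = ((guess.take word.length).count l : Int) := fun l => by
    rw [PySem.Dict.getD_foldl_insert_add_one, PySem.Dict.getD_empty, zero_add]
  -- B side: the items fold is a sum over the distinct letters of word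
  rw [PySem.Dict.items_eq_map_keys W hWnodup 0, PySem.List.foldl_add, List.map_map]
  rw [hWkeys]
  have htermB : ∀ l ∈ PySem.Set.ofList word,
      ((fun p => min p.2 (((guess.take word.length).foldl
          (fun d letter => d.insert letter (d.getD letter 0 + 1))
          PySem.Dict.empty).getD p.1 0)) ∘ fun k => (k, W.getD k 0)) l
      = ((pvPairs word guess).count (l, l) : Int)
        + min ((word.count l : Int) - ((pvPairs word guess).count (l, l) : Int))
            (((guess.take word.length).count l : Int) - ((pvPairs word guess).count (l, l) : Int)) := by
    intro l _
    simp only [Function.comp_apply]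
    rw [hW l, hGC l]
    have h1 := hmw l
    have h2 := hmg l
    omega
  rw [List.map_congr_left htermB, PySem.List.sum_map_add_int]
  -- number of greens, letter by letter
  have hG : ((pvPairs word guess).countP (fun p => p.1 == p.2) : Int)
      = ((PySem.Set.ofList word).map
          (fun l => ((pvPairs word guess).count (l, l) : Int))).sum := by
    apply pv_countP_green _ _ (PySem.Set.nodup_ofList word)
    intro p hp hgp
    rw [PySem.Set.mem_ofList]
    exact (List.of_mem_zip hp).1
  -- extend the min-sum from word's letters to L (extra letters contribute 0)
  have hF : (L.map (fun l =>
        min ((word.count l : Int) - ((pvPairs word guess).count (l, l) : Int))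
          (((guess.take word.length).count l : Int) - ((pvPairs word guess).count (l, l) : Int)))).sum
      = ((PySem.Set.ofList word).map (fun l =>
        min ((word.count l : Int) - ((pvPairs word guess).count (l, l) : Int))
          (((guess.take word.length).count l : Int) - ((pvPairs word guess).count (l, l) : Int)))).sum := by
    rw [← List.sum_toFinset _ (by rw [hLdef]; exact PySem.Set.nodup_ofList _),
      ← List.sum_toFinset _ (PySem.Set.nodup_ofList word)]
    refine (Finset.sum_subset ?_ ?_).symm
    · intro x hx
      rw [List.mem_toFinset, PySem.Set.mem_ofList] at hx
      rw [List.mem_toFinset, hLdef, PySem.Set.mem_ofList]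
      exact List.mem_append_left _ hx
    · intro x hxL hxK
      rw [List.mem_toFinset, PySem.Set.mem_ofList] at hxK
      have hw0 : word.count x = 0 := List.count_eq_zero_of_not_mem hxK
      have hm0 := hmw x
      omega
  rw [hF, hG]
  -- both sides are now linear in the same sums
  have hcnt := pv_countP_split (pvPairs word guess)
  rw [pv_pairs_length word guess hpre'] at hcnt
  omega
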